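-- pv_equiv track=rewrite | github.com/SevenChords/Light_Colors | main.py | find_min_spacing_no_wrap
-- ===== SOURCE A (Python) =====
-- def find_min_spacing_no_wrap(_list):
--     _l = len(_list)
--     min_spacing = _l
--     for _i in range(_l):
--         for j in range(_l):
--             if j >= min_spacing:
--                 break
--             k = (_i + j) % _l
--             if k == _i:
--                 continue
--             if _i + j >= _l:
--                 break
--             if _list[_i][0] in _list[k]:
--                 min_spacing = j
--                 break
--             if _list[_i][1] in _list[k]:
--                 min_spacing = j
--                 break
--     return min_spacing
-- ===== SOURCE B (Python) =====
-- def find_min_spacing_no_wrap(_list):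
--     best = len(_list)
--     last2 = {}
--     for k, s in enumerate(_list):
--         for c in s:
--             i = last2.get(c)
--             if i is not None and k - i < best:
--                 best = k - i
--         last2[s[0]] = k
--         last2[s[1]] = k
--     return best
-- ===== Notes on version B (the rewrite author's own statement) =====
-- stated objective: faster
-- what changed: A scans, for every index i, all later indices for one whose string contains one of the first two characters of _list[i]; B makes a single left-to-right pass keeping a dict from each character to the last index whose first two characters contain it, so each element's nearest earlier partner is found by dict lookups instead of an inner scan.
-- outside the precondition, e.g. on find_min_spacing_no_wrap(['']): A returns 1, B raises IndexError; on find_min_spacing_no_wrap(['ab', 'bc', 'x', 'zz']): A returns 1, B raises IndexError; on find_min_spacing_no_wrap(['a', 'b']): A raises IndexError, B raises IndexError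
import Mathlib
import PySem

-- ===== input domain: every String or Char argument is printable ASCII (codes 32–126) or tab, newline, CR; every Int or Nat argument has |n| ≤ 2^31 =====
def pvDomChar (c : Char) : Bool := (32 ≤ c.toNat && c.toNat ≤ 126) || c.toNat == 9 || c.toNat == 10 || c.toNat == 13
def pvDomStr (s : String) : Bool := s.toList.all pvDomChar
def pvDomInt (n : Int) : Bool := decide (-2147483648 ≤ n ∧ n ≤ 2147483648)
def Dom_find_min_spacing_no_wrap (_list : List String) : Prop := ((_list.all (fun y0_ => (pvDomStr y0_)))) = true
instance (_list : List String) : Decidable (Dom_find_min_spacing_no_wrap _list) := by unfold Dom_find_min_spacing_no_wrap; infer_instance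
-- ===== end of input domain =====

-- B replaces A's quadratic scan of all later positions by one left-to-right pass with a
-- dictionary mapping each character to the last index whose first two characters contain it.

-- ===== PORT A =====
-- inner `for j in range(_l)` loop of A, with its three `break`s and the `continue`;
-- the list indices _i and k are always in range (0 ≤ _i,k < _l), so `.getD ""` is exact;
-- `none` from PySem.Str.pyGet? is Python's IndexError on _list[_i][0] / [1] (excluded by Pre_)
def pvInnerA (_list : List String) (_l _i : Int) : List Int → Int → Int
  | [], min_spacing => min_spacing
  | j :: js, min_spacing =>
    if min_spacing ≤ j then min_spacing                     -- if j >= min_spacing: break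
    else
      let k := PySem.Int.mod (_i + j) _l
      if k = _i then pvInnerA _list _l _i js min_spacing    -- continue
      else if _l ≤ _i + j then min_spacing                  -- if _i + j >= _l: break
      else
        let si := (PySem.List.pyGet? _list _i).getD ""
        let sk := (PySem.List.pyGet? _list k).getD ""
        match PySem.Str.pyGet? si 0 with
        | none => min_spacing                               -- IndexError (outside Pre_)
        | some c0 =>
          if PySem.Chars.isIn [c0] sk.toList then j         -- _list[_i][0] in _list[k]
          else
            match PySem.Str.pyGet? si 1 with
            | none => min_spacing                           -- IndexError (outside Pre_)
            | some c1 =>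
              if PySem.Chars.isIn [c1] sk.toList then j     -- _list[_i][1] in _list[k]
              else pvInnerA _list _l _i js min_spacing

def find_min_spacing_no_wrap (_list : List String) : Int :=
  let _l : Int := PySem.List.len _list
  (PySem.List.pyRange 0 _l 1).foldl
    (fun min_spacing _i => pvInnerA _list _l _i (PySem.List.pyRange 0 _l 1) min_spacing) _l

-- ===== PORT B =====
def find_min_spacing_no_wrap_alt (_list : List String) : Int :=
  ((PySem.List.enumerate _list).foldl
    (fun (st : Int × PySem.Dict Char Int) ks =>
      -- for c in s: i = last2.get(c); if i is not None and k - i < best: best = k - i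
      let best := ks.2.toList.foldl (fun b c =>
        match st.2.get? c with
        | some i => if ks.1 - i < b then ks.1 - i else b
        | none => b) st.1
      -- last2[s[0]] = k; last2[s[1]] = k  (none = IndexError, outside Pre_)
      let last2 := match PySem.Str.pyGet? ks.2 0 with
        | some c => st.2.insert c ks.1
        | none => st.2
      let last2 := match PySem.Str.pyGet? ks.2 1 with
        | some c => last2.insert c ks.1
        | none => last2
      (best, last2))
    (PySem.List.len _list, PySem.Dict.empty)).1

-- ===== PRECONDITION & SPEC =====
-- Pre_ excludes lists containing a string of fewer than 2 characters: reading s[0]/s[1] of such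
-- an element raises IndexError in A whenever the element is probed (on the remaining excluded
-- inputs A returns a value only because an earlier match stopped the probing), and B, which
-- reads s[0]/s[1] of every element, raises on all of them.
def Pre_find_min_spacing_no_wrap (_list : List String) : Prop :=
  ∀ s ∈ _list, 2 ≤ s.toList.length
instance (_list : List String) : Decidable (Pre_find_min_spacing_no_wrap _list) := by
  unfold Pre_find_min_spacing_no_wrap; infer_instance
def pvWitness_find_min_spacing_no_wrap : List String := ["ab", "cd", "bx"]

def Spec_find_min_spacing_no_wrap (_list : List String) (out : Int) : Prop := out = find_min_spacing_no_wrap_alt _list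
instance (_list : List String) (out : Int) : Decidable (Spec_find_min_spacing_no_wrap _list out) := by unfold Spec_find_min_spacing_no_wrap; infer_instance

-- ===== CLAIM (what is proved, stated in full; the proofs are below) =====
def Claim_equal_find_min_spacing_no_wrap : Prop := ∀ (_list : List String), Dom_find_min_spacing_no_wrap _list → Pre_find_min_spacing_no_wrap _list → Spec_find_min_spacing_no_wrap _list (find_min_spacing_no_wrap _list)

-- ===== LEMMAS AND PROOFS =====

-- the first two characters of element i (the characters A probes as _list[i][0] / [1])
def pvF2 (xs : List String) (i : Nat) : List Char := (xs.getD i "").toList.take 2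
-- "element k matches element i": some character of xs[k] is among the first two of xs[i]
def pvHit (xs : List String) (i k : Nat) : Prop :=
  ∃ c ∈ (xs.getD k "").toList, c ∈ pvF2 xs i

-- v is the minimum of `base` and the set S
def pvIsMinOf (v base : Int) (S : Int → Prop) : Prop :=
  v ≤ base ∧ (∀ x, S x → v ≤ x) ∧ (v = base ∨ S v)
-- forward gaps of matching pairs both of whose indices are below m
def pvPairS (xs : List String) (m : Nat) (x : Int) : Prop :=
  ∃ i k : Nat, i < k ∧ k < m ∧ pvHit xs i k ∧ x = (k : Int) - (i : Int)
-- the last index i < m with c among the first two characters of xs[i]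
def pvLastIdx (xs : List String) : Nat → Char → Option Int
  | 0, _ => none
  | m + 1, c => if c ∈ pvF2 xs m then some (m : Int) else pvLastIdx xs m c

theorem pvIsMinOf_unique {v w base : Int} {S : Int → Prop}
    (hv : pvIsMinOf v base S) (hw : pvIsMinOf w base S) : v = w := by
  obtain ⟨hv1, hv2, hv3⟩ := hv
  obtain ⟨hw1, hw2, hw3⟩ := hw
  have h1 : v ≤ w := hw3.elim (fun h => h ▸ hv1) (hv2 _)
  have h2 : w ≤ v := hv3.elim (fun h => h ▸ hw1) (hw2 _)
  omega

theorem pvLastIdx_some {xs : List String} {m : Nat} {c : Char} {v : Int}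
    (h : pvLastIdx xs m c = some v) :
    ∃ i : Nat, v = (i : Int) ∧ i < m ∧ c ∈ pvF2 xs i := by
  induction m with
  | zero => simp [pvLastIdx] at h
  | succ m ih =>
    by_cases hc : c ∈ pvF2 xs m
    · simp [pvLastIdx, hc] at h
      exact ⟨m, h.symm, Nat.lt_succ_self m, hc⟩
    · simp [pvLastIdx, hc] at h
      obtain ⟨i, h1, h2, h3⟩ := ih h
      exact ⟨i, h1, Nat.lt_succ_of_lt h2, h3⟩

theorem pvLastIdx_ge {xs : List String} {m i : Nat} {c : Char}
    (hi : i < m) (hc : c ∈ pvF2 xs i) :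
    ∃ i0 : Nat, pvLastIdx xs m c = some (i0 : Int) ∧ i ≤ i0 ∧ i0 < m ∧ c ∈ pvF2 xs i0 := by
  induction m with
  | zero => omega
  | succ m ih =>
    by_cases hc' : c ∈ pvF2 xs m
    · exact ⟨m, by simp [pvLastIdx, hc'], by omega, Nat.lt_succ_self m, hc'⟩
    · have him : i < m := by
        rcases Nat.lt_succ_iff_lt_or_eq.mp hi with h | h
        · exact h
        · exact absurd (h ▸ hc) hc'
      obtain ⟨i0, h1, h2, h3, h4⟩ := ih him
      exact ⟨i0, by simp [pvLastIdx, hc', h1], h2, Nat.lt_succ_of_lt h3, h4⟩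

-- A's inner loop from j = a ≥ 1, for a source string of ≥ 2 characters, computes
-- min(ms, first matching forward gap ≥ a)
theorem pvInnerA_spec (xs : List String) (i : Nat) (hi : i < xs.length)
    (h2 : 2 ≤ (xs.getD i "").toList.length) :
    ∀ (fuel a : Nat) (ms : Int), 1 ≤ a → fuel = xs.length - a →
    pvIsMinOf
      (pvInnerA xs (xs.length : Int) (i : Int) (PySem.List.pyRange (a : Int) (xs.length : Int) 1) ms)
      ms
      (fun x => ∃ j : Nat, a ≤ j ∧ i + j < xs.length ∧ pvHit xs i (i + j) ∧ x = (j : Int)) := by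
  intro fuel
  induction fuel with
  | zero =>
    intro a ms ha hfuel
    have hna : xs.length ≤ a := by omega
    rw [PySem.List.pyRange_one_eq_nil (by exact_mod_cast hna)]
    refine ⟨le_refl ms, ?_, Or.inl rfl⟩
    rintro x ⟨j, haj, hjn, _, rfl⟩
    omega
  | succ fuel ih =>
    intro a ms ha hfuel
    have haltn : a < xs.length := by omega
    rw [PySem.List.pyRange_one_cons (by exact_mod_cast haltn)]
    simp only [pvInnerA]
    by_cases hms : ms ≤ (a : Int)
    · rw [if_pos hms]
      refine ⟨le_refl ms, ?_, Or.inl rfl⟩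
      rintro x ⟨j, haj, hjn, _, rfl⟩
      have : (a : Int) ≤ (j : Int) := by exact_mod_cast haj
      omega
    · rw [if_neg hms]
      have hn0 : (0 : Int) < (xs.length : Int) := by exact_mod_cast Nat.lt_of_le_of_lt (Nat.zero_le a) haltn
      by_cases hin : i + a < xs.length
      · -- k = i + a, a genuine forward probe
        have hk : PySem.Int.mod ((i : Int) + (a : Int)) (xs.length : Int) = ((i + a : Nat) : Int) := by
          rw [PySem.Int.mod_eq_emod_of_pos hn0]
          push_cast
          exact Int.emod_eq_of_lt (by positivity) (by exact_mod_cast hin)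
        rw [hk]
        have hkne : ¬ ((i + a : Nat) : Int) = (i : Int) := by
          intro h
          have : i + a = i := by exact_mod_cast h
          omega
        rw [if_neg hkne]
        have hnb : ¬ ((xs.length : Int) ≤ (i : Int) + (a : Int)) := by
          exact_mod_cast not_le.mpr (by exact_mod_cast hin : (i : Int) + (a : Int) < (xs.length : Int))
        rw [if_neg hnb]
        -- resolve the two string lookups
        have hsi : (PySem.List.pyGet? xs (i : Int)).getD "" = xs.getD i "" := by
          rw [PySem.List.pyGet?_natCast, List.getD_eq_getElem?_getD]
        have hsk : (PySem.List.pyGet? xs ((i + a : Nat) : Int)).getD "" = xs.getD (i + a) "" := by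
          rw [PySem.List.pyGet?_natCast, List.getD_eq_getElem?_getD]
        obtain ⟨c0, c1, rest, hcc⟩ : ∃ c0 c1 rest, (xs.getD i "").toList = c0 :: c1 :: rest := by
          match h : (xs.getD i "").toList with
          | [] => rw [h] at h2; simp at h2
          | [c] => rw [h] at h2; simp at h2
          | c0 :: c1 :: rest => exact ⟨c0, c1, rest, rfl⟩
        have hf2 : pvF2 xs i = [c0, c1] := by rw [pvF2, hcc]; rfl
        have hg0 : PySem.Str.pyGet? ((PySem.List.pyGet? xs (i : Int)).getD "") 0 = some c0 := by
          rw [hsi, show (0 : Int) = ((0 : Nat) : Int) from rfl, PySem.Str.pyGet?_natCast, hcc]; rfl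
        have hg1 : PySem.Str.pyGet? ((PySem.List.pyGet? xs (i : Int)).getD "") 1 = some c1 := by
          rw [hsi, show (1 : Int) = ((1 : Nat) : Int) from rfl, PySem.Str.pyGet?_natCast, hcc]; rfl
        rw [hg0]
        dsimp only
        by_cases h0 : c0 ∈ (xs.getD (i + a) "").toList
        · rw [hsk, if_pos (by rw [PySem.Chars.isIn_iff_infix, List.singleton_infix_iff]; exact h0)]
          refine ⟨by omega, ?_, Or.inr ⟨a, le_refl a, hin, ⟨c0, h0, by rw [hf2]; simp⟩, rfl⟩⟩
          rintro x ⟨j, haj, hjn, _, rfl⟩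
          exact_mod_cast haj
        · rw [hsk, if_neg (by rw [PySem.Chars.isIn_iff_infix, List.singleton_infix_iff]; exact h0), hg1]
          dsimp only
          by_cases h1 : c1 ∈ (xs.getD (i + a) "").toList
          · rw [if_pos (by rw [PySem.Chars.isIn_iff_infix, List.singleton_infix_iff]; exact h1)]
            refine ⟨by omega, ?_, Or.inr ⟨a, le_refl a, hin, ⟨c1, h1, by rw [hf2]; simp⟩, rfl⟩⟩
            rintro x ⟨j, haj, hjn, _, rfl⟩
            exact_mod_cast haj
          · rw [if_neg (by rw [PySem.Chars.isIn_iff_infix, List.singleton_infix_iff]; exact h1)]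
            rw [show ((a : Int) + 1) = ((a + 1 : Nat) : Int) by push_cast; ring]
            obtain ⟨hv1, hv2, hv3⟩ := ih (a + 1) ms (by omega) (by omega)
            refine ⟨hv1, ?_, ?_⟩
            · rintro x ⟨j, haj, hjn, hhit, rfl⟩
              rcases Nat.lt_or_ge a j with haj' | haj'
              · exact hv2 _ ⟨j, haj', hjn, hhit, rfl⟩
              · -- j = a: contradiction with no hit at a
                have hja : j = a := by omega
                subst hja
                obtain ⟨c, hck, hcf⟩ := hhit
                rw [hf2] at hcf
                simp only [List.mem_cons, List.not_mem_nil, or_false] at hcf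
                rcases hcf with rfl | rfl
                · exact absurd hck h0
                · exact absurd hck h1
            · rcases hv3 with h | ⟨j, haj', hjn', hhit', hxe⟩
              · exact Or.inl h
              · exact Or.inr ⟨j, by omega, hjn', hhit', hxe⟩
      · -- i + a ≥ n: the loop breaks (k ≠ i since a < n)
        have hk : PySem.Int.mod ((i : Int) + (a : Int)) (xs.length : Int)
            = (i : Int) + (a : Int) - (xs.length : Int) := by
          rw [PySem.Int.mod_eq_emod_of_pos hn0, ← Int.sub_emod_right]
          exact Int.emod_eq_of_lt (by omega) (by omega)
        rw [hk]
        have hkne : ¬ ((i : Int) + (a : Int) - (xs.length : Int)) = (i : Int) := by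
          intro h
          have : (a : Int) = (xs.length : Int) := by omega
          have : a = xs.length := by exact_mod_cast this
          omega
        rw [if_neg hkne, if_pos (by omega)]
        refine ⟨le_refl ms, ?_, Or.inl rfl⟩
        rintro x ⟨j, haj, hjn, _, rfl⟩
        omega

-- A's outer loop from _i = b computes min(ms, gaps of all matching pairs with source ≥ b)
theorem pvOuterA_spec (xs : List String) (hpre : ∀ s ∈ xs, 2 ≤ s.toList.length)
    (_hn : 0 < xs.length) :
    ∀ (fuel b : Nat) (ms : Int), 1 ≤ ms → fuel = xs.length - b →
    pvIsMinOf
      ((PySem.List.pyRange (b : Int) (xs.length : Int) 1).foldl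
        (fun min_spacing _i =>
          pvInnerA xs (xs.length : Int) _i (PySem.List.pyRange 0 (xs.length : Int) 1) min_spacing) ms)
      ms
      (fun x => ∃ i k : Nat, b ≤ i ∧ i < k ∧ k < xs.length ∧ pvHit xs i k ∧ x = (k : Int) - (i : Int)) := by
  intro fuel
  induction fuel with
  | zero =>
    intro b ms hms hfuel
    have hnb : xs.length ≤ b := by omega
    rw [PySem.List.pyRange_one_eq_nil (show (xs.length : Int) ≤ (b : Int) by exact_mod_cast hnb),
        List.foldl_nil]
    refine ⟨le_refl ms, ?_, Or.inl rfl⟩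
    rintro x ⟨i, k, hbi, hik, hkn, _, rfl⟩
    omega
  | succ fuel ih =>
    intro b ms hms hfuel
    have hbltn : b < xs.length := by omega
    have hfe : fuel = xs.length - (b + 1) := by omega
    rw [PySem.List.pyRange_one_cons (show (b : Int) < (xs.length : Int) by exact_mod_cast hbltn),
        List.foldl_cons]
    have hn0 : (0 : Int) < (xs.length : Int) := by exact_mod_cast Nat.lt_of_le_of_lt (Nat.zero_le b) hbltn
    -- the first inner pass: j = 0 is skipped by the `continue`, then runs from j = 1
    have hfirst : pvInnerA xs (xs.length : Int) (b : Int) (PySem.List.pyRange 0 (xs.length : Int)) ms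
        = pvInnerA xs (xs.length : Int) (b : Int) (PySem.List.pyRange 1 (xs.length : Int)) ms := by
      rw [PySem.List.pyRange_one_cons hn0]
      simp only [pvInnerA]
      rw [if_neg (show ¬ ms ≤ (0 : Int) by omega)]
      have hk : PySem.Int.mod ((b : Int) + 0) (xs.length : Int) = (b : Int) := by
        rw [add_zero, PySem.Int.mod_eq_emod_of_pos hn0]
        exact Int.emod_eq_of_lt (by positivity) (by exact_mod_cast hbltn)
      rw [hk, if_pos rfl, zero_add]
    rw [hfirst]
    have hb2 : 2 ≤ (xs.getD b "").toList.length := by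
      refine hpre _ ?_
      rw [List.getD_eq_getElem xs "" hbltn]
      exact List.getElem_mem _
    obtain ⟨hv1, hv2, hv3⟩ := pvInnerA_spec xs b hbltn hb2 (xs.length - 1) 1 ms (le_refl 1) rfl
    simp only [Nat.cast_one] at hv1 hv2 hv3
    set v := pvInnerA xs (xs.length : Int) (b : Int) (PySem.List.pyRange 1 (xs.length : Int)) ms with hv
    have hv4 : 1 ≤ v := by
      rcases hv3 with h | ⟨j, hj1, _, _, hxe⟩
      · omega
      · rw [hxe]; exact_mod_cast hj1
    rw [show ((b : Int) + 1) = ((b + 1 : Nat) : Int) by push_cast; ring]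
    obtain ⟨hw1, hw2, hw3⟩ := ih (b + 1) v hv4 hfe
    refine ⟨le_trans hw1 hv1, ?_, ?_⟩
    · rintro x ⟨i, k, hbi, hik, hkn, hhit, rfl⟩
      rcases Nat.lt_or_ge b i with hbi' | hbi'
      · exact hw2 _ ⟨i, k, hbi', hik, hkn, hhit, rfl⟩
      · have hib : i = b := by omega
        subst hib
        have hj : v ≤ ((k - i : Nat) : Int) := by
          refine hv2 _ ⟨k - i, by omega, by omega, ?_, rfl⟩
          rw [show i + (k - i) = k by omega]
          exact hhit
        have hki : ((k - i : Nat) : Int) = (k : Int) - (i : Int) := by omega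
        exact le_trans hw1 (hki ▸ hj)
    · rcases hw3 with h | ⟨i, k, hbi, hik, hkn, hhit, hxe⟩
      · rcases hv3 with h' | ⟨j, hj1, hjn, hhit2, hxe⟩
        · exact Or.inl (by rw [h, h'])
        · refine Or.inr ⟨b, b + j, le_refl b, by omega, hjn, hhit2, ?_⟩
          rw [h, hxe]; push_cast; ring
      · exact Or.inr ⟨i, k, by omega, hik, hkn, hhit, hxe⟩

theorem pvA_good (xs : List String) (hpre : ∀ s ∈ xs, 2 ≤ s.toList.length) :
    pvIsMinOf (find_min_spacing_no_wrap xs) (xs.length : Int) (pvPairS xs xs.length) := by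
  unfold find_min_spacing_no_wrap
  simp only [PySem.List.len_eq]
  rcases Nat.eq_zero_or_pos xs.length with h0 | hpos
  · rw [PySem.List.pyRange_one_eq_nil (show (xs.length : Int) ≤ 0 by exact_mod_cast h0.le),
        List.foldl_nil]
    refine ⟨le_refl _, ?_, Or.inl rfl⟩
    rintro x ⟨i, k, hik, hkn, _, rfl⟩
    omega
  · obtain ⟨h1, h2, h3⟩ := pvOuterA_spec xs hpre hpos xs.length 0 (xs.length : Int)
      (by exact_mod_cast hpos) (by omega)
    simp only [Nat.cast_zero] at h1 h2 h3
    refine ⟨h1, ?_, ?_⟩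
    · rintro x ⟨i, k, hik, hkn, hhit, rfl⟩
      exact h2 _ ⟨i, k, Nat.zero_le i, hik, hkn, hhit, rfl⟩
    · rcases h3 with h | ⟨i, k, _, hik, hkn, hhit, hxe⟩
      · exact Or.inl h
      · exact Or.inr ⟨i, k, hik, hkn, hhit, hxe⟩

-- B's per-element character scan: min of best and all candidates k - last2[c]
theorem pvScan_spec (D : PySem.Dict Char Int) (mI : Int) :
    ∀ (cs : List Char) (best : Int),
    (cs.foldl (fun b c => match D.get? c with
        | some i => if mI - i < b then mI - i else b
        | none => b) best) ≤ best ∧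
    (∀ c ∈ cs, ∀ i, D.get? c = some i →
      (cs.foldl (fun b c => match D.get? c with
        | some i => if mI - i < b then mI - i else b
        | none => b) best) ≤ mI - i) ∧
    ((cs.foldl (fun b c => match D.get? c with
        | some i => if mI - i < b then mI - i else b
        | none => b) best) = best ∨
      ∃ c ∈ cs, ∃ i, D.get? c = some i ∧
        (cs.foldl (fun b c => match D.get? c with
          | some i => if mI - i < b then mI - i else b
          | none => b) best) = mI - i) := by
  intro cs
  induction cs with
  | nil => simp
  | cons x cs ih =>
    intro best
    simp only [List.foldl_cons]
    set b' := (match D.get? x with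
        | some i => if mI - i < best then mI - i else best
        | none => best) with hb'
    obtain ⟨h1, h2, h3⟩ := ih b'
    have hble : b' ≤ best := by
      rw [hb']; cases hD : D.get? x
      · exact le_refl best
      · dsimp only
        split
        · rename_i h; exact le_of_lt h
        · exact le_refl best
    refine ⟨le_trans h1 hble, ?_, ?_⟩
    · intro c hc i hD
      rcases List.mem_cons.mp hc with rfl | hc
      · -- head: b' ≤ mI - i already
        have : b' ≤ mI - i := by
          rw [hb', hD]; dsimp only
          split
          · exact le_refl _
          · rename_i h; omega
        exact le_trans h1 this
      · exact h2 c hc i hD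
    · rcases h3 with h | ⟨c, hc, i, hD, hr⟩
      · -- result = b'
        rw [h, hb']
        cases hD : D.get? x with
        | none => simp
        | some i =>
          simp only
          split
          · exact Or.inr ⟨x, List.mem_cons_self, i, hD, rfl⟩
          · exact Or.inl rfl
      · exact Or.inr ⟨c, List.mem_cons_of_mem _ hc, i, hD, hr⟩

theorem pvFoldInsert_get? (v : Int) :
    ∀ (l : List Char) (d : PySem.Dict Char Int) (c : Char),
    ((l.foldl (fun d c => d.insert c v) d).get? c) = if c ∈ l then some v else d.get? c := by
  intro l
  induction l with
  | nil => simp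
  | cons x l ih =>
    intro d c
    simp only [List.foldl_cons, ih]
    by_cases hc : c ∈ l
    · simp [hc]
    · by_cases hx : c = x
      · simp [hx, PySem.Dict.get?_insert_self]
      · simp [hc, hx, PySem.Dict.get?_insert_of_ne _ _ hx]

-- B's per-element dictionary update (last2[s[0]] = k; last2[s[1]] = k) writes exactly the
-- first two characters of s, in order
theorem pvUpd_eq (s : String) (v : Int) (d : PySem.Dict Char Int) :
    (match PySem.Str.pyGet? s 1 with
     | some c => (match PySem.Str.pyGet? s 0 with
                  | some c => d.insert c v
                  | none => d).insert c v
     | none => match PySem.Str.pyGet? s 0 with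
               | some c => d.insert c v
               | none => d)
    = (s.toList.take 2).foldl (fun d c => d.insert c v) d := by
  have h0 : PySem.Str.pyGet? s 0 = s.toList[0]? := by
    rw [show (0 : Int) = ((0 : Nat) : Int) from rfl, PySem.Str.pyGet?_natCast]
  have h1 : PySem.Str.pyGet? s 1 = s.toList[1]? := by
    rw [show (1 : Int) = ((1 : Nat) : Int) from rfl, PySem.Str.pyGet?_natCast]
  rw [h0, h1]
  match hts : s.toList with
  | [] => rfl
  | [c0] => rfl
  | c0 :: c1 :: rest => rfl

theorem pvB_fold (xs : List String) :
    ∀ (fuel m : Nat) (best : Int) (D : PySem.Dict Char Int),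
    m ≤ xs.length → fuel = xs.length - m →
    (∀ c, D.get? c = pvLastIdx xs m c) →
    pvIsMinOf best (xs.length : Int) (pvPairS xs m) →
    pvIsMinOf
      (((PySem.List.enumerate (xs.drop m) (m : Int)).foldl
        (fun (st : Int × PySem.Dict Char Int) ks =>
          let best := ks.2.toList.foldl (fun b c =>
            match st.2.get? c with
            | some i => if ks.1 - i < b then ks.1 - i else b
            | none => b) st.1
          let last2 := match PySem.Str.pyGet? ks.2 0 with
            | some c => st.2.insert c ks.1
            | none => st.2
          let last2 := match PySem.Str.pyGet? ks.2 1 with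
            | some c => last2.insert c ks.1
            | none => last2
          (best, last2))
        (best, D)).1)
      (xs.length : Int) (pvPairS xs xs.length) := by
  intro fuel
  induction fuel with
  | zero =>
    intro m best D hm hfuel hD hbest
    have hmn : m = xs.length := by omega
    subst hmn
    simp only [List.drop_length, PySem.List.enumerate_nil, List.foldl_nil]
    exact hbest
  | succ fuel ih =>
    intro m best D hm hfuel hD hbest
    have hmlt : m < xs.length := by omega
    rw [List.drop_eq_getElem_cons hmlt, PySem.List.enumerate_cons, List.foldl_cons]
    have hgetD : xs.getD m "" = xs[m] := List.getD_eq_getElem xs "" hmlt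
    have hf2 : pvF2 xs m = (xs[m]).toList.take 2 := by rw [pvF2, hgetD]
    dsimp only
    rw [show ((m : Int) + 1) = ((m + 1 : Nat) : Int) by push_cast; ring,
        pvUpd_eq (xs[m]) (m : Int) D]
    -- new dictionary invariant
    have hD'inv : ∀ c,
        (((xs[m]).toList.take 2).foldl (fun d c => d.insert c (m : Int)) D).get? c
          = pvLastIdx xs (m + 1) c := by
      intro c
      rw [pvFoldInsert_get?]
      simp only [pvLastIdx, hf2]
      by_cases hc : c ∈ (xs[m]).toList.take 2
      · simp [hc]
      · simp [hc, hD c]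
    -- new best invariant
    have hbest'inv : pvIsMinOf
        ((xs[m]).toList.foldl (fun b c =>
          match D.get? c with
          | some i => if (m : Int) - i < b then (m : Int) - i else b
          | none => b) best)
        (xs.length : Int) (pvPairS xs (m + 1)) := by
      obtain ⟨hs1, hs2, hs3⟩ := pvScan_spec D (m : Int) (xs[m]).toList best
      obtain ⟨hb1, hb2, hb3⟩ := hbest
      refine ⟨le_trans hs1 hb1, ?_, ?_⟩
      · rintro x ⟨i, k, hik, hkm, hhit, rfl⟩
        rcases Nat.lt_succ_iff_lt_or_eq.mp hkm with hkm' | rfl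
        · exact le_trans hs1 (hb2 _ ⟨i, k, hik, hkm', hhit, rfl⟩)
        · obtain ⟨c, hck, hci⟩ := hhit
          rw [hgetD] at hck
          obtain ⟨i0, hli, hii0, hi0m, _⟩ := pvLastIdx_ge hik hci
          have := hs2 c hck (i0 : Int) ((hD c).trans hli)
          omega
      · rcases hs3 with h | ⟨c, hc, i, hDc, hr⟩
        · rcases h ▸ hb3 with h' | ⟨i, k, hik, hkm, hhit, hx⟩
          · exact Or.inl h'
          · exact Or.inr ⟨i, k, hik, Nat.lt_succ_of_lt hkm, hhit, h ▸ hx⟩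
        · rw [hD c] at hDc
          obtain ⟨i', rfl, hi'm, hci'⟩ := pvLastIdx_some hDc
          refine Or.inr ⟨i', m, hi'm, Nat.lt_succ_self m, ⟨c, ?_, hci'⟩, hr⟩
          rw [hgetD]; exact hc
    exact ih (m + 1) _ _ (by omega) (by omega) hD'inv hbest'inv

theorem pvB_good (xs : List String) :
    pvIsMinOf (find_min_spacing_no_wrap_alt xs) (xs.length : Int) (pvPairS xs xs.length) := by
  unfold find_min_spacing_no_wrap_alt
  have h := pvB_fold xs xs.length 0 (xs.length : Int) PySem.Dict.empty (by omega) (by omega)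
    (fun c => by simp [pvLastIdx, PySem.Dict.get?_empty])
    ⟨le_refl _, by rintro x ⟨i, k, _, hk, _⟩; omega, Or.inl rfl⟩
  simp only [List.drop_zero, Nat.cast_zero] at h
  simpa only [PySem.List.len_eq] using h

-- ===== VERDICT (by name: the statement is the Claim_ definition above) =====
theorem find_min_spacing_no_wrap_spec : Claim_equal_find_min_spacing_no_wrap := by
  intro xs _hdom hpre
  unfold Spec_find_min_spacing_no_wrap
  unfold Pre_find_min_spacing_no_wrap at hpre
  exact pvIsMinOf_unique (pvA_good xs hpre) (pvB_good xs)
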